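-- pv_equiv track=rewrite | github.com/mangmangdream/oracle-mongodb-api-feature-support-analyzer | src/oracle_feature_support/fetcher.py | _pick_status_column
-- ===== SOURCE A (Python) =====
-- from typing import Callable, Iterable
--
-- def _pick_status_column(columns: Iterable[str]) -> str | None:
--     candidates = [c for c in columns if c]
--     if "Support (Since)" in candidates:
--         return "Support (Since)"
--     for col in candidates:
--         low = col.lower()
--         if "support" in low or "status" in low:
--             return col
--     return None
-- ===== SOURCE B (Python) =====
-- def _pick_status_column(columns):
--     result = None
--     for col in columns:
--         if not col:
--             continue
--         if col == "Support (Since)":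
--             return col
--         if result is None:
--             low = col.lower()
--             if "support" in low or "status" in low:
--                 result = col
--     return result
-- ===== Notes on version B (the rewrite author's own statement) =====
-- stated objective: simpler
-- what changed: Replaced A's two sequential passes (build a filtered candidates list, test membership of 'Support (Since)', then rescan for a keyword match) with a single loop over columns that returns 'Support (Since)' on sight and otherwise remembers the first keyword match as a pending result returned after the loop.
import Mathlib
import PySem

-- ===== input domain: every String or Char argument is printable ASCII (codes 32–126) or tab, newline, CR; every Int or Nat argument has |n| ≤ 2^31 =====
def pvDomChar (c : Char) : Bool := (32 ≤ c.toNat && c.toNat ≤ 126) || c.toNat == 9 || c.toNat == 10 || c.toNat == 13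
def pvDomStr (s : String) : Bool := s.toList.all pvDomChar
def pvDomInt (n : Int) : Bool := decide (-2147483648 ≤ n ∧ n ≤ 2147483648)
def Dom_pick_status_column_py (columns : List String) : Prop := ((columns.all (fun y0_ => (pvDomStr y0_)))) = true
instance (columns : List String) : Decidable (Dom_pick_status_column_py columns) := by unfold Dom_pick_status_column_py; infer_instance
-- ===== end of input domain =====

-- B replaces A's two passes (filter + membership test, then keyword scan) with one loop
-- carrying a pending result and an early return on the exact "Support (Since)" match (objective: simpler).


-- ===== PORT A =====
-- the 'for col in candidates: … return col' loop of A
def pickLoopA : List String → Option String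
  | [] => none
  | col :: rest =>
    let low := PySem.Str.lower col
    if PySem.Str.isIn "support" low || PySem.Str.isIn "status" low then some col
    else pickLoopA rest

def pick_status_column_py (columns : List String) : Option String :=
  let candidates := columns.filter (fun c => !(c == ""))
  if "Support (Since)" ∈ candidates then some "Support (Since)"
  else pickLoopA candidates

-- ===== PORT B =====
-- B's single loop: 'result' is the pending accumulator, early return on the exact match
def altLoop : List String → Option String → Option String
  | [], result => result
  | col :: rest, result =>
    if col == "" then altLoop rest result
    else if col == "Support (Since)" then some col
    else if result == none
            && (PySem.Str.isIn "support" (PySem.Str.lower col)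
                || PySem.Str.isIn "status" (PySem.Str.lower col)) then
      altLoop rest (some col)
    else altLoop rest result

def pick_status_column_py_alt (columns : List String) : Option String := altLoop columns none

-- ===== PRECONDITION & SPEC =====
def Spec_pick_status_column_py (columns : List String) (out : Option String) : Prop := out = pick_status_column_py_alt columns
instance (columns : List String) (out : Option String) : Decidable (Spec_pick_status_column_py columns out) := by unfold Spec_pick_status_column_py; infer_instance

-- ===== CLAIM (what is proved, stated in full; the proofs are below) =====
def Claim_equal_pick_status_column_py : Prop := ∀ (columns : List String), Dom_pick_status_column_py columns → Spec_pick_status_column_py columns (pick_status_column_py columns)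

-- ===== LEMMAS AND PROOFS =====

-- loop invariant: altLoop on the remaining columns equals A's global decision on the
-- filtered remainder, with the pending result taking precedence over a later generic hit
lemma altLoop_eq (l : List String) (p : Option String) :
    altLoop l p =
      (if "Support (Since)" ∈ l.filter (fun c => !(c == "")) then some "Support (Since)"
       else match p with
            | some x => some x
            | none => pickLoopA (l.filter (fun c => !(c == "")))) := by
  induction l generalizing p with
  | nil => cases p <;> simp [altLoop, pickLoopA]
  | cons col rest ih =>
    by_cases h0 : col = ""
    · subst h0; simp [altLoop, ih]
    · by_cases hS : col = "Support (Since)"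
      · subst hS; simp [altLoop]
      · have hf : (col :: rest).filter (fun c => !(c == "")) =
            col :: rest.filter (fun c => !(c == "")) := by simp [h0]
        have hSne : ¬ ("Support (Since)" = col) := fun h => hS h.symm
        rw [hf]
        by_cases hk : (PySem.Chars.isIn ['s','u','p','p','o','r','t'] (PySem.Chars.lower col.toList) = true
            ∨ PySem.Chars.isIn ['s','t','a','t','u','s'] (PySem.Chars.lower col.toList) = true)
        · cases p with
          | none =>
            rw [show altLoop (col :: rest) none = altLoop rest (some col) from by
              simp [altLoop, h0, hS, hk], ih]
            simp [pickLoopA, hk, hSne]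

          | some x =>
            rw [show altLoop (col :: rest) (some x) = altLoop rest (some x) from by
              simp [altLoop, h0, hS], ih]
            simp [hSne]
        · simp only [not_or, Bool.not_eq_true] at hk
          have hstep : altLoop (col :: rest) p = altLoop rest p := by
            cases p <;> simp [altLoop, h0, hS, hk.1, hk.2]
          rw [hstep, ih]
          cases p <;> simp [pickLoopA, hk.1, hk.2, hSne]
-- ===== VERDICT (by name: the statement is the Claim_ definition above) =====
theorem pick_status_column_py_spec : Claim_equal_pick_status_column_py := by
  intro columns _
  unfold Spec_pick_status_column_py pick_status_column_py pick_status_column_py_alt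
  rw [altLoop_eq]
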